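-- pv_equiv track=rewrite | github.com/IhnoH/AlgorithmSolve | 9655.py | oneThr
-- ===== SOURCE A (Python) =====
-- def oneThr(n):
--     i = 0
--     sw = [1, 3]
--     tmp = n%4
--     if tmp == 0: return 'CY'
--     while True:
--         if tmp - 1 == 0: return 'CY'
--         elif tmp - 3 == 0: return 'SK'
--         else: tmp = tmp - 1*sw[i%2]
--         i += 1
-- ===== SOURCE B (Python) =====
-- def oneThr(n):
--     return 'SK' if n % 4 == 3 else 'CY'
-- ===== Notes on version B (the rewrite author's own statement) =====
-- stated objective: simpler
-- what changed: Replaces A's while-loop with alternating subtraction (sw list, index parity) by the closed-form one-liner branching on n % 4 == 3.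
import Mathlib
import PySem

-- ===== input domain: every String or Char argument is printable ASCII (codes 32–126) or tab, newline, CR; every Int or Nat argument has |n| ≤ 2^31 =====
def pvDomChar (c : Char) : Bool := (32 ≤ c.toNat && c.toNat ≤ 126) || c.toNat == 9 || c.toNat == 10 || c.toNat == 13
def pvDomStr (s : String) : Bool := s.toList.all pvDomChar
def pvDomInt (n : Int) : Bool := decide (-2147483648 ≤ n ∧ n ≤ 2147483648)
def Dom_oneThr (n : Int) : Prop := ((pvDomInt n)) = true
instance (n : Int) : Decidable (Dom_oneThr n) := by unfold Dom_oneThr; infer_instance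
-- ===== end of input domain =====

-- B replaces A's obfuscated subtraction loop with the direct closed-form branch on n mod 4 (simpler).


-- ===== PORT A =====
-- loop of A, ported with fuel (the Python loop runs at most 2 iterations since tmp = n%4 < 4;
-- fuel only makes the same computation total and is never exhausted on reachable states)
def oneThrLoop (fuel : Nat) (tmp : Int) (i : Int) : String :=
  match fuel with
  | 0 => "CY"
  | f + 1 =>
    if tmp - 1 = 0 then "CY"
    else if tmp - 3 = 0 then "SK"
    else oneThrLoop f (tmp - 1 * (if PySem.Int.mod i 2 = 0 then 1 else 3)) (i + 1)

def oneThr (n : Int) : String :=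
  let tmp := PySem.Int.mod n 4
  if tmp = 0 then "CY"
  else oneThrLoop 4 tmp 0

-- ===== PORT B =====
def oneThr_alt (n : Int) : String :=
  if PySem.Int.mod n 4 = 3 then "SK" else "CY"

-- ===== PRECONDITION & SPEC =====
def Spec_oneThr (n : Int) (out : String) : Prop := out = oneThr_alt n
instance (n : Int) (out : String) : Decidable (Spec_oneThr n out) := by unfold Spec_oneThr; infer_instance

-- ===== CLAIM (what is proved, stated in full; the proofs are below) =====
def Claim_equal_oneThr : Prop := ∀ (n : Int), Dom_oneThr n → Spec_oneThr n (oneThr n)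

-- ===== LEMMAS AND PROOFS =====

-- ===== VERDICT (by name: the statement is the Claim_ definition above) =====
theorem oneThr_spec : Claim_equal_oneThr := by
  intro n _
  unfold Spec_oneThr oneThr oneThr_alt
  have h4 : (0:Int) < 4 := by norm_num
  have h0 : 0 ≤ PySem.Int.mod n 4 := PySem.Int.mod_nonneg n h4
  have h1 : PySem.Int.mod n 4 < 4 := PySem.Int.mod_lt n h4
  interval_cases h : (PySem.Int.mod n 4) <;> simp [oneThrLoop, PySem.Int.mod]
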